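-- pv_equiv track=rewrite | github.com/juanauli/Inversion-Sequences-Consecutive-Patterns-of-Relations | count_consec_ineq3.py | count_geq_geq
-- ===== SOURCE A (Python) =====
-- def count_geq_geq(sequence):
--     index = 0
--     counter = 0
--     while index < len(sequence) - 2:
--         if sequence[index] >= sequence[index + 1] >= sequence[index + 2]:
--             counter += 1
--         index += 1
--     return counter
-- ===== SOURCE B (Python) =====
-- def count_geq_geq(sequence):
--     # Run-length algorithm: decompose the sequence into maximal non-increasing
--     # runs; a run of length L contains exactly max(L - 2, 0) non-increasing
--     # triples, and no triple spans two runs. Sum the closed form over runs.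
--     total = 0
--     run = 1  # length of the current non-increasing run
--     for a, b in zip(sequence, sequence[1:]):
--         if a >= b:
--             run += 1
--         else:
--             if run > 2:
--                 total += run - 2
--             run = 1
--     if run > 2:
--         total += run - 2
--     return total
-- ===== Notes on version B (the rewrite author's own statement) =====
-- stated objective: alternative
-- what changed: Replaces A's per-triple test (one comparison pair per index) with a run-length algorithm: track maximal non-increasing runs and add the closed-form count max(L-2,0) per run.
import Mathlib
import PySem

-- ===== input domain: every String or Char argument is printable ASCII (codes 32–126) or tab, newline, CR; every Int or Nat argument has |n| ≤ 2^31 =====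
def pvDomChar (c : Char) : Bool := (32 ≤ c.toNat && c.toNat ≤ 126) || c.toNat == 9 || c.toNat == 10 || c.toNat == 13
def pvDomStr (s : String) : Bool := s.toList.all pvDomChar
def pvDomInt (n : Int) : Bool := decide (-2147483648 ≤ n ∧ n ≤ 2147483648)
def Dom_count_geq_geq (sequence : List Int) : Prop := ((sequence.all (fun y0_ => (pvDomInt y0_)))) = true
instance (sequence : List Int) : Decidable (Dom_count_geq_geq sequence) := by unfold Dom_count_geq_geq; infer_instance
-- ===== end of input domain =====

-- B replaces A's per-triple while-loop with a run-length algorithm (maximal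
-- non-increasing runs, closed form max(L-2,0) triples per run); objective: alternative.


-- ===== PORT A =====
-- while-loop of A: index runs while index < len - 2; Nat index is exact since the
-- Python index starts at 0 and the loop is skipped when len < 3 (Nat sub truncates to 0, same test result).
def countGo (s : List Int) (index : Nat) (counter : Int) : Int :=
  if index < s.length - 2 then
    countGo s (index + 1)
      (if s[index]?.getD 0 ≥ s[index + 1]?.getD 0 ∧ s[index + 1]?.getD 0 ≥ s[index + 2]?.getD 0
       then counter + 1 else counter)
  else counter
termination_by s.length - 2 - index

def count_geq_geq (sequence : List Int) : Int := countGo sequence 0 0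

-- ===== PORT B =====
-- the for-loop over zip(sequence, sequence[1:]) as recursion over the zipped pairs;
-- the trailing flush of the last run is the base case.
def altGo (total run : Int) : List (Int × Int) → Int
  | [] => if run > 2 then total + run - 2 else total
  | (a, b) :: t =>
      if a ≥ b then altGo total (run + 1) t
      else altGo (if run > 2 then total + run - 2 else total) 1 t

def count_geq_geq_alt (sequence : List Int) : Int :=
  altGo 0 1 (List.zip sequence sequence.tail)

-- ===== PRECONDITION & SPEC =====
def Spec_count_geq_geq (sequence : List Int) (out : Int) : Prop := out = count_geq_geq_alt sequence
instance (sequence : List Int) (out : Int) : Decidable (Spec_count_geq_geq sequence out) := by unfold Spec_count_geq_geq; infer_instance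

-- ===== CLAIM (what is proved, stated in full; the proofs are below) =====
def Claim_equal_count_geq_geq : Prop := ∀ (sequence : List Int), Dom_count_geq_geq sequence → Spec_count_geq_geq sequence (count_geq_geq sequence)

-- ===== LEMMAS AND PROOFS =====

-- structural spec: count of non-increasing triples
def specF : List Int → Int
  | a :: b :: c :: t => (if a ≥ b ∧ b ≥ c then 1 else 0) + specF (b :: c :: t)
  | _ => 0

-- incremental spec: run = length of the current non-increasing run ending at x
def specR (run x : Int) : List Int → Int
  | [] => 0
  | b :: t => if x ≥ b then (if run ≥ 2 then 1 else 0) + specR (run + 1) b t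
              else specR 1 b t

theorem specF_head_ge (x b : Int) (t : List Int) (h : x ≥ b) :
    specF (x :: b :: t) = specF (b :: b :: t) := by
  match t with
  | [] => simp [specF]
  | c :: t' => simp [specF, h]

theorem specF_head_lt (x b : Int) (t : List Int) (h : ¬ x ≥ b) :
    specF (x :: b :: t) = specF (b :: t) := by
  match t with
  | [] => simp [specF]
  | c :: t' => simp [specF, h]

theorem specR_eq_specF : ∀ (t : List Int) (x run : Int), 1 ≤ run →
    specR run x t = if 2 ≤ run then specF (x :: x :: t) else specF (x :: t) := by
  intro t
  induction t with
  | nil =>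
      intro x run _
      simp [specR, specF]
  | cons b t' ih =>
      intro x run hrun
      by_cases hxb : x ≥ b
      · have h1 := ih b (run + 1) (by omega)
        rw [if_pos (by omega)] at h1
        have hu : specF (x :: x :: b :: t')
            = (if x ≥ x ∧ x ≥ b then 1 else 0) + specF (x :: b :: t') := rfl
        by_cases h2 : 2 ≤ run
        · rw [if_pos h2]
          simp only [specR, if_pos hxb, if_pos h2, h1]
          rw [hu, specF_head_ge x b t' hxb]
          simp [hxb]
        · rw [if_neg h2]
          simp only [specR, if_pos hxb, if_neg h2, h1]
          rw [specF_head_ge x b t' hxb, zero_add]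
      · have h1 := ih b 1 (by omega)
        rw [if_neg (by omega)] at h1
        simp only [specR, if_neg hxb, h1]
        have hu : specF (x :: x :: b :: t')
            = (if x ≥ x ∧ x ≥ b then 1 else 0) + specF (x :: b :: t') := rfl
        by_cases h2 : 2 ≤ run
        · rw [if_pos h2, hu, specF_head_lt x b t' hxb]
          simp [hxb]
        · rw [if_neg h2, specF_head_lt x b t' hxb]

theorem altGo_eq : ∀ (t : List Int) (x total run : Int), 1 ≤ run →
    altGo total run (List.zip (x :: t) t)
      = total + (if run > 2 then run - 2 else 0) + specR run x t := by
  intro t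
  induction t with
  | nil =>
      intro x total run _
      simp only [List.zip_nil_right, altGo, specR]
      split_ifs <;> omega
  | cons b t' ih =>
      intro x total run hrun
      simp only [List.zip_cons_cons, altGo, specR]
      by_cases hxb : x ≥ b
      · rw [if_pos hxb, if_pos hxb, ih b total (run + 1) (by omega)]
        split_ifs <;> omega
      · rw [if_neg hxb, if_neg hxb, ih b _ 1 (by omega)]
        split_ifs <;> omega

theorem alt_eq_specF : ∀ s : List Int, count_geq_geq_alt s = specF s := by
  intro s
  match s with
  | [] => simp [count_geq_geq_alt, altGo, specF]
  | x :: t =>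
      unfold count_geq_geq_alt
      simp only [List.tail_cons]
      rw [altGo_eq t x 0 1 (by omega), specR_eq_specF t x 1 (by omega)]
      simp

theorem countGo_eq (s : List Int) : ∀ n i counter, s.length - 2 - i = n →
    countGo s i counter = counter + specF (s.drop i) := by
  intro n
  induction n with
  | zero =>
      intro i counter h
      rw [countGo]
      have hi : ¬ i < s.length - 2 := by omega
      rw [if_neg hi]
      have : (s.drop i).length < 3 := by
        simp [List.length_drop]; omega
      match hd : s.drop i, this with
      | [], _ => simp [specF]
      | [a], _ => simp [specF]
      | [a, b], _ => simp [specF]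
      | a :: b :: c :: t, hlen => simp at hlen; omega
  | succ n ih =>
      intro i counter h
      rw [countGo]
      have hi : i < s.length - 2 := by omega
      rw [if_pos hi]
      rw [ih (i + 1) _ (by omega)]
      have h0 : i < s.length := by omega
      have h1 : i + 1 < s.length := by omega
      have h2 : i + 2 < s.length := by omega
      have hd0 : s.drop i = s[i] :: s.drop (i + 1) := List.drop_eq_getElem_cons h0
      have hd1 : s.drop (i + 1) = s[i + 1] :: s.drop (i + 2) := List.drop_eq_getElem_cons h1
      have hd2 : s.drop (i + 2) = s[i + 2] :: s.drop (i + 3) := List.drop_eq_getElem_cons h2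
      rw [hd0, hd1, hd2]
      have e0 : s[i]?.getD 0 = s[i] := by simp [List.getElem?_eq_getElem h0]
      have e1 : s[i + 1]?.getD 0 = s[i + 1] := by simp [List.getElem?_eq_getElem h1]
      have e2 : s[i + 2]?.getD 0 = s[i + 2] := by simp [List.getElem?_eq_getElem h2]
      rw [e0, e1, e2]
      rw [specF, ← hd2, ← hd1]
      split_ifs <;> omega

-- ===== VERDICT (by name: the statement is the Claim_ definition above) =====
theorem count_geq_geq_spec : Claim_equal_count_geq_geq := by
  intro s _
  unfold Spec_count_geq_geq count_geq_geq
  rw [countGo_eq s _ 0 0 rfl, alt_eq_specF]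
  simp
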